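-- pv_equiv track=rewrite | github.com/sasomanse/filter | filter-17.py | calc_mixed_streak
-- ===== SOURCE A (Python) =====
-- def calc_mixed_streak(combo, chars):
--     max_len = current = 0
--     for c in combo:
--         if c in chars:
--             current += 1
--             max_len = max(max_len, current)
--         else:
--             current = 0
--     return max_len
-- ===== SOURCE B (Python) =====
-- def calc_mixed_streak(combo, chars):
--     best = 0
--     i = 0
--     n = len(combo)
--     while i < n:
--         if combo[i] in chars:
--             j = i
--             while j < n and combo[j] in chars:
--                 j += 1
--             best = max(best, j - i)
--             i = j
--         else:
--             i += 1
--     return best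
-- ===== Notes on version B (the rewrite author's own statement) =====
-- stated objective: alternative
-- what changed: Replaces the running counter with reset-on-miss by a span scan: an inner pointer walks each maximal run of member characters, its length is taken once per run, and the maximum run length is kept.
import Mathlib
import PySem

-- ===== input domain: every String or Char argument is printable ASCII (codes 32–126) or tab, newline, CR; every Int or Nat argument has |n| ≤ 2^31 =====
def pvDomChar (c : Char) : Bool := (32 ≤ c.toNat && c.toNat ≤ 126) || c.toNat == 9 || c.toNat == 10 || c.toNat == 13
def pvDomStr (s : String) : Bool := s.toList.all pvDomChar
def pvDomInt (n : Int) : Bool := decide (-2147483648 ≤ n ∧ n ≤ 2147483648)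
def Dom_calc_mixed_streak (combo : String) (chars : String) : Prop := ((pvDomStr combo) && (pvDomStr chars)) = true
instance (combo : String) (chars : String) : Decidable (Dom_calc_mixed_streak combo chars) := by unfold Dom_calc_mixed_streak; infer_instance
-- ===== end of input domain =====

-- B replaces A's running counter with a span scan over maximal member runs (same cost, different decomposition).


-- ===== PORT A =====
-- 'c in chars' for the single character c drawn from combo is char membership in chars.
def calc_mixed_streak (combo : String) (chars : String) : Int :=
  (combo.toList.foldl
    (fun (s : Int × Int) c =>
      if chars.toList.contains c then (max s.1 (s.2 + 1), s.2 + 1) else (s.1, 0))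
    (0, 0)).1

-- ===== PORT B =====
-- span scan: outer loop; on a member char, the inner loop walks to the end of
-- the maximal member run (takeWhile/dropWhile), records its length, resumes after it.
def pvRuns (k : Char → Bool) : List Char → Int
  | [] => 0
  | x :: xs =>
    if h : k x then
      max (((x :: xs).takeWhile k).length : Int) (pvRuns k ((x :: xs).dropWhile k))
    else
      pvRuns k xs
termination_by l => l.length
decreasing_by
  · simp only [List.dropWhile_cons, h, if_true, List.length_cons]
    exact Nat.lt_succ_of_le (List.length_dropWhile_le k xs)
  · simp

def calc_mixed_streak_alt (combo : String) (chars : String) : Int :=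
  pvRuns (fun c => chars.toList.contains c) combo.toList

-- ===== PRECONDITION & SPEC =====
def Spec_calc_mixed_streak (combo : String) (chars : String) (out : Int) : Prop := out = calc_mixed_streak_alt combo chars
instance (combo : String) (chars : String) (out : Int) : Decidable (Spec_calc_mixed_streak combo chars out) := by unfold Spec_calc_mixed_streak; infer_instance

-- ===== CLAIM (what is proved, stated in full; the proofs are below) =====
def Claim_equal_calc_mixed_streak : Prop := ∀ (combo : String) (chars : String), Dom_calc_mixed_streak combo chars → Spec_calc_mixed_streak combo chars (calc_mixed_streak combo chars)

-- ===== LEMMAS AND PROOFS =====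

-- reference function: pvF k l cur = best streak reachable from l with a current run of cur
def pvF (k : Char → Bool) : List Char → Nat → Nat
  | [], cur => cur
  | x :: xs, cur => if k x then pvF k xs (cur + 1) else max cur (pvF k xs 0)

theorem pvF_ge (k : Char → Bool) : ∀ (l : List Char) (cur : Nat), cur ≤ pvF k l cur := by
  intro l
  induction l with
  | nil => intro cur; simp [pvF]
  | cons x xs ih =>
    intro cur
    simp only [pvF]
    split
    · exact Nat.le_trans (Nat.le_succ cur) (ih (cur + 1))
    · exact Nat.le_max_left _ _

theorem pvF_false_cons (k : Char → Bool) (x : Char) (xs : List Char) (cur : Nat)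
    (h : k x = false) : pvF k (x :: xs) cur = max cur (pvF k xs 0) := by
  simp [pvF, h]

theorem pvF_trues (k : Char → Bool) : ∀ (t rest : List Char) (cur : Nat),
    (∀ y ∈ t, k y = true) → pvF k (t ++ rest) cur = pvF k rest (cur + t.length) := by
  intro t
  induction t with
  | nil => intro rest cur _; simp
  | cons x xs ih =>
    intro rest cur h
    have hx : k x = true := h x (List.mem_cons_self ..)
    simp only [List.cons_append, pvF, hx, if_true]
    rw [ih rest (cur + 1) (fun y hy => h y (List.mem_cons_of_mem _ hy))]
    congr 1
    simp [List.length_cons]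
    omega

theorem pvF_tail_max (k : Char → Bool) (l : List Char) (cur : Nat)
    (h : ∀ x ∈ l.head?, k x = false) : pvF k l cur = max cur (pvF k l 0) := by
  cases l with
  | nil => simp [pvF]
  | cons x xs =>
    have hx : k x = false := h x (by simp)
    rw [pvF_false_cons k x xs cur hx, pvF_false_cons k x xs 0 hx]
    omega

theorem pvHead_dropWhile {α : Type} (p : α → Bool) : ∀ (l : List α) (y : α) (ys : List α),
    List.dropWhile p l = y :: ys → p y = false := by
  intro l
  induction l with
  | nil => intro y ys h; simp [List.dropWhile] at h
  | cons x xs ih =>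
    intro y ys h
    rw [List.dropWhile_cons] at h
    by_cases hx : p x = true
    · rw [if_pos hx] at h; exact ih y ys h
    · rw [if_neg hx] at h
      cases h
      simpa using hx

theorem pvRuns_eq_pvF_aux (k : Char → Bool) : ∀ (n : Nat) (l : List Char), l.length ≤ n →
    pvRuns k l = (pvF k l 0 : Int) := by
  intro n
  induction n with
  | zero =>
    intro l hl
    have hnil : l = [] := List.eq_nil_of_length_eq_zero (Nat.le_zero.mp hl)
    subst hnil
    simp [pvRuns, pvF]
  | succ n ih =>
    intro l hl
    cases l with
    | nil => simp [pvRuns, pvF]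
    | cons x xs =>
      by_cases hx : k x = true
      · rw [pvRuns, dif_pos hx]
        have hsplit : (x :: xs).takeWhile k ++ (x :: xs).dropWhile k = x :: xs :=
          List.takeWhile_append_dropWhile
        have htr : ∀ y ∈ (x :: xs).takeWhile k, k y = true := by
          intro y hy; exact List.mem_takeWhile_imp hy
        have hlen : ((x :: xs).dropWhile k).length ≤ n := by
          rw [List.dropWhile_cons, if_pos hx]
          have := List.length_dropWhile_le k xs
          simp only [List.length_cons] at hl
          omega
        have hhead : ∀ y ∈ ((x :: xs).dropWhile k).head?, k y = false := by
          intro y hy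
          cases hcase : (x :: xs).dropWhile k with
          | nil => rw [hcase] at hy; simp at hy
          | cons z zs =>
            rw [hcase] at hy
            simp only [List.head?_cons, Option.mem_some_iff] at hy
            subst hy
            exact pvHead_dropWhile k (x :: xs) z zs hcase
        rw [ih _ hlen]
        have : max (((x :: xs).takeWhile k).length : Int)
            ((pvF k ((x :: xs).dropWhile k) 0 : Nat) : Int)
            = ((max ((x :: xs).takeWhile k).length (pvF k ((x :: xs).dropWhile k) 0) : Nat) : Int) := by
          push_cast; ring_nf
        rw [this]
        congr 1
        conv_rhs => rw [← hsplit]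
        rw [pvF_trues k _ _ 0 htr, Nat.zero_add,
          pvF_tail_max k ((x :: xs).dropWhile k) ((x :: xs).takeWhile k).length hhead]
      · rw [pvRuns, dif_neg hx]
        have hlen : xs.length ≤ n := by
          simp only [List.length_cons] at hl; omega
        rw [ih xs hlen]
        congr 1
        have hx' : k x = false := by simpa using hx
        rw [pvF_false_cons k x xs 0 hx']
        simp

theorem pvRuns_eq_pvF (k : Char → Bool) (l : List Char) : pvRuns k l = (pvF k l 0 : Int) :=
  pvRuns_eq_pvF_aux k l.length l (Nat.le_refl _)

theorem foldl_eq_pvF (k : Char → Bool) : ∀ (l : List Char) (m c : Nat), c ≤ m →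
    (List.foldl (fun (s : Int × Int) ch =>
        if k ch then (max s.1 (s.2 + 1), s.2 + 1) else (s.1, 0))
      ((m : Int), (c : Int)) l).1 = ((max m (pvF k l c) : Nat) : Int) := by
  intro l
  induction l with
  | nil =>
    intro m c hcm
    simp [pvF]
    omega
  | cons x xs ih =>
    intro m c hcm
    simp only [List.foldl_cons]
    by_cases hx : k x
    · simp only [hx, if_true]
      have h1 : (max (m : Int) ((c : Int) + 1), (c : Int) + 1)
          = (((max m (c + 1) : Nat) : Int), ((c + 1 : Nat) : Int)) := by
        push_cast; ring_nf
      rw [h1, ih (max m (c + 1)) (c + 1) (Nat.le_max_right _ _)]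
      have hge := pvF_ge k xs (c + 1)
      simp only [pvF, hx, if_true]
      congr 1
      omega
    · rw [if_neg hx]
      have h0 : ((m : Int), (0 : Int)) = ((m : Int), ((0 : Nat) : Int)) := by norm_num
      rw [h0, ih m 0 (Nat.zero_le m)]
      rw [show pvF k (x :: xs) c = max c (pvF k xs 0) from
        pvF_false_cons k x xs c (by simpa using hx)]
      congr 1
      omega

-- ===== VERDICT (by name: the statement is the Claim_ definition above) =====
theorem calc_mixed_streak_spec : Claim_equal_calc_mixed_streak := by
  intro combo chars _
  unfold Spec_calc_mixed_streak calc_mixed_streak calc_mixed_streak_alt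
  set k := fun c => chars.toList.contains c with hk
  have h := foldl_eq_pvF k combo.toList 0 0 (Nat.le_refl 0)
  simp only [Nat.cast_zero] at h
  rw [h, pvRuns_eq_pvF k combo.toList]
  simp
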